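-- pv_equiv track=rewrite | github.com/ejfn/advent-of-code | 2016/9/day9.py | decompressed_length_v2
-- ===== SOURCE A (Python) =====
-- def decompressed_length_v2(s):
--     length = 0
--     i = 0
--     while i < len(s):
--         if s[i] == '(':
--             end_marker = s.find(')', i)
--             if end_marker == -1:
--                 length += len(s) - i
--                 break
--
--             marker = s[i+1:end_marker]
--             parts = marker.split('x')
--             if len(parts) != 2:
--                 length += 1
--                 i += 1
--                 continue
--
--             chars_to_take = int(parts[0])
--             repeat_count = int(parts[1])
--
--             # Recursive call on the content
--             content_start = end_marker + 1
--             content_end = content_start + chars_to_take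
--             content = s[content_start:content_end]
--
--             sub_len = decompressed_length_v2(content)
--             length += sub_len * repeat_count
--
--             i = content_end
--         else:
--             length += 1
--             i += 1
--     return length
-- ===== SOURCE B (Python) =====
-- def decompressed_length_v2(s):
--     if not s:
--         return 0
--     if s[0] != '(':
--         # consume the whole run of literal characters up to the next '('
--         p = s.find('(')
--         if p == -1:
--             return len(s)
--         return p + decompressed_length_v2(s[p:])
--     j = s.find(')')
--     if j == -1:
--         return len(s)
--     parts = s[1:j].split('x')
--     if len(parts) != 2:
--         return 1 + decompressed_length_v2(s[1:])
--     n = int(parts[0])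
--     r = int(parts[1])
--     rest = s[j + 1:]
--     return r * decompressed_length_v2(rest[:n]) + decompressed_length_v2(rest[n:])
-- ===== Notes on version B (the rewrite author's own statement) =====
-- stated objective: simpler
-- what changed: A's index-driven while loop with an accumulator, find-from-index and explicit slice bounds is replaced by a plain structural recursion that destructures the string: each maximal run of literal characters is consumed in one str.find step and, at a marker, it recurses on the repeated block and on the remainder, with no index arithmetic and no accumulator; …
-- outside the precondition, e.g. on decompressed_length_v2('a(-1x2)'): A returns 2, B returns 1; on decompressed_length_v2('(-9x1)'): A does not finish within the time limit, B returns 0; on decompressed_length_v2('(3x0)(-9x1)'): A returns 3, B returns 3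
import Mathlib
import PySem

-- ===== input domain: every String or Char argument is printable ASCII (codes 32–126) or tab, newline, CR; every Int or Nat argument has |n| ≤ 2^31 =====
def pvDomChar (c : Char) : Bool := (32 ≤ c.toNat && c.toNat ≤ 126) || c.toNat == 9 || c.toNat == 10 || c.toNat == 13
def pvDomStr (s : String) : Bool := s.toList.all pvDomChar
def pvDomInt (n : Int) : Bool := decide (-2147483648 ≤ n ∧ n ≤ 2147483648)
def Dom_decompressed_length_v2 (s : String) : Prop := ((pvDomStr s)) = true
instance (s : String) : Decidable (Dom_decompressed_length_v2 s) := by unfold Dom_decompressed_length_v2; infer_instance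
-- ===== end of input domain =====

-- B replaces A's index-driven while loop (accumulator, find-from-index, slice bounds) by a plain
-- structural recursion on the string (objective: simpler); equal return value on Pre_ outside D_.

-- ===== PORT A =====
-- The while loop of A, with the recursive call inlined as `pvAgo fuel content 0 0`.
-- `fuel` is a totality guard only: A diverges on some inputs outside Pre_ (markers whose
-- negative count jumps the index to or before the marker's own '('); inside Pre_ the index
-- strictly increases at every step, so the fuel is never exhausted (proved below on Pre_ ∖ D_).
def pvAgo (fuel : Nat) (s : List Char) (i : Int) (length : Int) : Int :=
  match fuel with
  | 0 => length  -- fuel exhausted: unreachable on Pre_ inputs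
  | fuel + 1 =>
    if i < (s.length : Int) then
      if PySem.List.pyGet? s i = some '(' then
        -- end_marker = s.find(')', i)
        let em := PySem.Chars.findFrom s [')'] i
        if em = -1 then length + ((s.length : Int) - i)
        else
          -- marker = s[i+1:end_marker]; parts = marker.split('x')
          let parts := PySem.Chars.splitOn (PySem.List.slice s (some (i + 1)) (some em)) ['x']
          if parts.length ≠ 2 then pvAgo fuel s (i + 1) (length + 1)
          else
            -- int(parts[0]), int(parts[1]); getD is safe: parts.length = 2 here
            match PySem.Int.ofChars? (parts.getD 0 []), PySem.Int.ofChars? (parts.getD 1 []) with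
            | some chars_to_take, some repeat_count =>
              let content_end := em + 1 + chars_to_take
              let content := PySem.List.slice s (some (em + 1)) (some content_end)
              let sub := pvAgo fuel content 0 0
              pvAgo fuel s content_end (length + sub * repeat_count)
            | _, _ => length  -- int() raises ValueError here; excluded by Pre_
      else pvAgo fuel s (i + 1) (length + 1)
    else length

def decompressed_length_v2 (s : String) : Int :=
  pvAgo ((s.toList.length + 2) * (s.toList.length + 2)) s.toList 0 0

-- ===== PORT B =====
-- general facts about PySem.Chars.find on a single character, cited by the
-- termination proofs of pvBgo (and reused by the equivalence proofs below)
theorem pv_singleton_prefix_iff (c : Char) (v : List Char) : [c] <+: v ↔ v.head? = some c := by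
  cases v with
  | nil => simp
  | cons a l => simp [List.cons_prefix_cons, eq_comm]

theorem pv_occ_iff (v : List Char) (j : Nat) (c : Char) : [c] <+: v.drop j ↔ v[j]? = some c := by
  rw [pv_singleton_prefix_iff, List.head?_eq_getElem?, List.getElem?_drop]
  simp

theorem pv_find_spec' (u : List Char) (c : Char) (h : PySem.Chars.find u [c] ≠ -1) :
    0 ≤ PySem.Chars.find u [c] ∧ u[(PySem.Chars.find u [c]).toNat]? = some c ∧
      ∀ i < (PySem.Chars.find u [c]).toNat, u[i]? ≠ some c := by
  have h0 : 0 ≤ PySem.Chars.find u [c] := by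
    have := PySem.Chars.neg_one_le_find u [c]; omega
  obtain ⟨h1, h2⟩ := PySem.Chars.find_spec h0
  refine ⟨h0, (pv_occ_iff u _ c).mp h1, fun i hi hc => h2 i hi ((pv_occ_iff u i c).mpr hc)⟩

-- termination helpers for pvBgo (cited in decreasing_by)
theorem pv_slice_len_le {α : Type} (xs : List α) (a? b? : Option Int) :
    (PySem.List.slice xs a? b?).length ≤ xs.length := by
  cases a? with
  | none =>
    cases b? with
    | none => simp [PySem.List.slice]
    | some b => simp [PySem.List.slice]
  | some a =>
    cases b? with
    | none => simp [PySem.List.slice]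
    | some b =>
      rw [PySem.List.length_slice]
      have := PySem.List.clampIdx_le xs.length b
      omega

theorem pv_rest_len_lt (c : Char) (t : List Char) (j : Int) (hj : 0 ≤ j) :
    (PySem.List.slice (c :: t) (some (j + 1)) none).length < (c :: t).length := by
  rw [PySem.List.slice_from _ (by omega : (0:Int) ≤ j + 1)]
  simp only [List.length_drop, List.length_cons]
  omega

theorem pv_run_len_lt (c : Char) (t : List Char) (hc : c ≠ '(')
    (hp : PySem.Chars.find (c :: t) ['('] ≠ -1) :
    (PySem.List.slice (c :: t) (some (PySem.Chars.find (c :: t) ['('])) none).length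
      < (c :: t).length := by
  obtain ⟨h0, h1, -⟩ := pv_find_spec' (c :: t) '(' hp
  have h1' : 1 ≤ (PySem.Chars.find (c :: t) ['(']).toNat := by
    rcases Nat.eq_zero_or_pos (PySem.Chars.find (c :: t) ['(']).toNat with h | h
    · rw [h] at h1
      simp at h1
      exact absurd h1 hc
    · exact h
  rw [PySem.List.slice_from _ h0]
  simp only [List.length_drop, List.length_cons]
  omega

def pvBgo (s : List Char) : Int :=
  match s with
  | [] => 0
  | c :: t =>
    if hc : c ≠ '(' then
      -- p = s.find('('); consume the whole literal run
      let p := PySem.Chars.find (c :: t) ['(']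
      if _hp : p = -1 then ((c :: t).length : Int)
      else p + pvBgo (PySem.List.slice (c :: t) (some p) none)
    else
      -- j = s.find(')')
      let j := PySem.Chars.find (c :: t) [')']
      if _hj : j = -1 then ((c :: t).length : Int)
      else
        -- parts = s[1:j].split('x')
        let parts := PySem.Chars.splitOn (PySem.List.slice (c :: t) (some 1) (some j)) ['x']
        if parts.length ≠ 2 then 1 + pvBgo t
        else
          match PySem.Int.ofChars? (parts.getD 0 []), PySem.Int.ofChars? (parts.getD 1 []) with
          | some n, some r =>
            -- rest = s[j+1:]
            let rest := PySem.List.slice (c :: t) (some (j + 1)) none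
            r * pvBgo (PySem.List.slice rest none (some n)) + pvBgo (PySem.List.slice rest (some n) none)
          | _, _ => 0  -- int() raises ValueError here; excluded by Pre_
termination_by s.length
decreasing_by
  · exact pv_run_len_lt c t hc _hp
  · simp
  · have h0 : (0:Int) ≤ PySem.Chars.find (c :: t) [')'] := by
      have := PySem.Chars.neg_one_le_find (c :: t) [')']
      omega
    exact Nat.lt_of_le_of_lt (pv_slice_len_le _ _ _) (pv_rest_len_lt c t _ h0)
  · have h0 : (0:Int) ≤ PySem.Chars.find (c :: t) [')'] := by
      have := PySem.Chars.neg_one_le_find (c :: t) [')']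
      omega
    exact Nat.lt_of_le_of_lt (pv_slice_len_le _ _ _) (pv_rest_len_lt c t _ h0)

def decompressed_length_v2_alt (s : String) : Int := pvBgo s.toList

-- ===== PRECONDITION & SPEC =====
-- Pre_ excludes strings containing a would-be marker "(AxB)" (a '(' whose first following ')'
-- encloses text splitting on 'x' into exactly two pieces) where A or B is not int-parsable
-- (A raises ValueError when it reaches one) or where the count A is negative: there A's index
-- jumps backwards, so on many such inputs A loops forever (e.g. "(-9x1)", where the index even
-- goes negative and wraps around), and where A does terminate, its value (it re-counts the
-- marker's own tail characters, returning 2 on "a(-1x2)") and B's plain Python-slice reading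
-- of the repeat region (returning 1 there) are two defensible answers to a corner the
-- compression format leaves unspecified. This is a static condition over all '(' positions,
-- so it also excludes inputs whose bad marker is never reached by A (A and B may still agree
-- there); see claim.json cites for one input of each kind.
def pvMarkerOKb (w : List Char) : Bool :=
  let j := PySem.Chars.find w [')']
  if j = -1 then true
  else
    let parts := PySem.Chars.splitOn (w.take j.toNat) ['x']
    if parts.length = 2 then
      match PySem.Int.ofChars? (parts.getD 0 []), PySem.Int.ofChars? (parts.getD 1 []) with
      | some a, some _ => decide (0 ≤ a)
      | _, _ => false
    else true

def pvGoodb (cs : List Char) : Bool :=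
  (List.range cs.length).all
    (fun k => !(cs[k]? == some '(') || pvMarkerOKb (cs.drop (k + 1)))

def Pre_decompressed_length_v2 (s : String) : Prop := pvGoodb s.toList = true
instance (s : String) : Decidable (Pre_decompressed_length_v2 s) := by
  unfold Pre_decompressed_length_v2; infer_instance

def pvWitness_decompressed_length_v2 : String := "X(8x2)(3x3)ABCY"

def Spec_decompressed_length_v2 (s : String) (out : Int) : Prop := out = decompressed_length_v2_alt s
instance (s : String) (out : Int) : Decidable (Spec_decompressed_length_v2 s out) := by
  unfold Spec_decompressed_length_v2; infer_instance

-- ===== CLAIM (what is proved, stated in full; the proofs are below) =====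
def Claim_equal_decompressed_length_v2 : Prop :=
  ∀ (s : String), Dom_decompressed_length_v2 s → Pre_decompressed_length_v2 s →
    Spec_decompressed_length_v2 s (decompressed_length_v2 s)

-- ===== LEMMAS AND PROOFS =====

theorem pv_find_eq (u : List Char) (c : Char) (j : Nat) (hocc : u[j]? = some c)
    (hmin : ∀ i < j, u[i]? ≠ some c) : PySem.Chars.find u [c] = (j : Int) := by
  have hne : PySem.Chars.find u [c] ≠ -1 := by
    rw [PySem.Chars.find_ne_neg_one_iff]
    rw [← PySem.Chars.isIn_iff_infix, ← PySem.Chars.exists_prefix_drop_iff_isIn]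
    exact ⟨j, (pv_occ_iff u j c).mpr hocc⟩
  obtain ⟨h0, h1, h2⟩ := pv_find_spec' u c hne
  have : (PySem.Chars.find u [c]).toNat = j := by
    by_contra hne2
    rcases Nat.lt_or_ge (PySem.Chars.find u [c]).toNat j with hlt | hge
    · exact hmin _ hlt h1
    · exact h2 j (by omega) hocc
  omega

theorem pv_find_cons_ne (a c : Char) (t : List Char) (h : a ≠ c) :
    PySem.Chars.find (a :: t) [c] =
      if PySem.Chars.find t [c] = -1 then -1 else 1 + PySem.Chars.find t [c] := by
  by_cases hf : PySem.Chars.find t [c] = -1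
  · rw [if_pos hf]
    rw [PySem.Chars.find_eq_neg_one_iff] at hf ⊢
    intro hinf
    apply hf
    rw [← PySem.Chars.isIn_iff_infix, ← PySem.Chars.exists_prefix_drop_iff_isIn] at hinf ⊢
    obtain ⟨j, hj⟩ := hinf
    rw [pv_occ_iff] at hj
    cases j with
    | zero => simp at hj; exact absurd hj h
    | succ k => exact ⟨k, by rw [pv_occ_iff]; simpa using hj⟩
  · rw [if_neg hf]
    obtain ⟨h0, h1, h2⟩ := pv_find_spec' t c hf
    set jN := (PySem.Chars.find t [c]).toNat with hjN
    have : PySem.Chars.find (a :: t) [c] = ((jN + 1 : Nat) : Int) := by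
      apply pv_find_eq
      · simpa using h1
      · intro i hi
        cases i with
        | zero => simpa using h
        | succ k => simpa using h2 k (by omega)
    omega

-- first occurrence inside a prefix is the first occurrence of the whole list
theorem pv_find_take (w : List Char) (m : Nat) (c : Char)
    (h : PySem.Chars.find (w.take m) [c] ≠ -1) :
    PySem.Chars.find w [c] = PySem.Chars.find (w.take m) [c] := by
  obtain ⟨h0, h1, h2⟩ := pv_find_spec' (w.take m) c h
  set jN := (PySem.Chars.find (w.take m) [c]).toNat with hjN
  have hjm : jN < m := by
    rw [List.getElem?_take] at h1
    by_contra hge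
    rw [if_neg (by omega)] at h1
    simp at h1
  have hocc : w[jN]? = some c := by
    rwa [List.getElem?_take, if_pos hjm] at h1
  have hmin : ∀ i < jN, w[i]? ≠ some c := by
    intro i hi hc
    exact h2 i hi (by rwa [List.getElem?_take, if_pos (by omega)])
  rw [pv_find_eq w c jN hocc hmin]; omega

-- pvGoodb closure under take / drop (content slices of a good string are good)
theorem pv_goodb_elim (cs : List Char) (h : pvGoodb cs = true) (k : Nat) (hk : k < cs.length)
    (hc : cs[k]? = some '(') : pvMarkerOKb (cs.drop (k + 1)) = true := by
  unfold pvGoodb at h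
  rw [List.all_eq_true] at h
  have := h k (List.mem_range.mpr hk)
  simpa [hc] using this

theorem pv_goodb_intro (cs : List Char)
    (h : ∀ k : Nat, k < cs.length → cs[k]? = some '(' → pvMarkerOKb (cs.drop (k + 1)) = true) :
    pvGoodb cs = true := by
  unfold pvGoodb
  rw [List.all_eq_true]
  intro k hk
  rw [List.mem_range] at hk
  by_cases hc : cs[k]? = some '('
  · simp [h k hk hc]
  · have hcf : (cs[k]? == some '(') = false := by simpa using hc
    simp [hcf]

theorem pv_markerOK_take (w : List Char) (q : Nat) (h : pvMarkerOKb w = true) :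
    pvMarkerOKb (w.take q) = true := by
  by_cases hj : PySem.Chars.find (w.take q) [')'] = -1
  · simp only [pvMarkerOKb]
    rw [if_pos hj]
  · have hfind : PySem.Chars.find w [')'] = PySem.Chars.find (w.take q) [')'] :=
      pv_find_take w q ')' hj
    obtain ⟨h0, h1, -⟩ := pv_find_spec' (w.take q) ')' hj
    have hjm : (PySem.Chars.find (w.take q) [')']).toNat < q := by
      rw [List.getElem?_take] at h1
      by_contra hge
      rw [if_neg (by omega)] at h1
      simp at h1
    have htake : List.take (PySem.Chars.find (w.take q) [')']).toNat (List.take q w)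
        = List.take (PySem.Chars.find (w.take q) [')']).toNat w := by
      rw [List.take_take, Nat.min_def, if_pos (by omega)]
    simp only [pvMarkerOKb] at h ⊢
    rw [hfind] at h
    rw [if_neg hj] at h
    rw [if_neg hj, htake]
    exact h

theorem pv_goodb_drop (cs : List Char) (d : Nat) (h : pvGoodb cs = true) :
    pvGoodb (cs.drop d) = true := by
  apply pv_goodb_intro
  intro k hk hc
  rw [List.length_drop] at hk
  have hdk : d + k < cs.length := by omega
  have hget : (cs.drop d)[k]? = cs[d + k]? := List.getElem?_drop
  have := pv_goodb_elim cs h (d + k) hdk (by rw [← hget]; exact hc)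
  rw [List.drop_drop]
  convert this using 3

theorem pv_goodb_take (cs : List Char) (m : Nat) (h : pvGoodb cs = true) :
    pvGoodb (cs.take m) = true := by
  apply pv_goodb_intro
  intro k hk hc
  rw [List.length_take] at hk
  have hkm : k < m := by omega
  have hkl : k < cs.length := by omega
  have hget : (cs.take m)[k]? = cs[k]? := by
    rw [List.getElem?_take, if_pos hkm]
  rw [List.drop_take]
  exact pv_markerOK_take _ _ (pv_goodb_elim cs h k hkl (by rw [← hget]; exact hc))

-- B consumes literal runs in one step; these lemmas recover the one-char step
theorem pv_find_eq_neg_one_of_not_mem (u : List Char) (c : Char) (h : c ∉ u) :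
    PySem.Chars.find u [c] = -1 := by
  rw [PySem.Chars.find_eq_neg_one_iff]
  intro hinf
  have hIsIn : PySem.Chars.isIn [c] u = true := by
    rw [PySem.Chars.isIn_iff_infix]; exact hinf
  have hex : ∃ j, [c] <+: u.drop j := by
    rw [PySem.Chars.exists_prefix_drop_iff_isIn]; exact hIsIn
  obtain ⟨j, hj⟩ := hex
  rw [pv_occ_iff] at hj
  exact h (List.mem_of_getElem? hj)

theorem pv_not_mem_of_find_neg (u : List Char) (c : Char)
    (h : PySem.Chars.find u [c] = -1) : c ∉ u := by
  intro hmem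
  rw [PySem.Chars.find_eq_neg_one_iff] at h
  apply h
  obtain ⟨j, hjlt, hje⟩ := List.getElem_of_mem hmem
  rw [← PySem.Chars.isIn_iff_infix, ← PySem.Chars.exists_prefix_drop_iff_isIn]
  exact ⟨j, (pv_occ_iff u j c).mpr (by rw [List.getElem?_eq_getElem hjlt, hje])⟩

theorem pvBgo_no_paren (u : List Char) (h : '(' ∉ u) : pvBgo u = (u.length : Int) := by
  cases u with
  | nil => simp [pvBgo]
  | cons c t =>
    have hc : c ≠ '(' := fun he => h (he ▸ List.mem_cons_self)
    simp only [pvBgo]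
    rw [dif_pos hc, dif_pos (pv_find_eq_neg_one_of_not_mem (c :: t) '(' h)]

theorem pvBgo_drop_run : ∀ (n : Nat) (u : List Char), u.length ≤ n →
    ∀ k : Nat, (∀ i < k, u[i]? ≠ some '(') → k ≤ u.length →
    pvBgo u = (k : Int) + pvBgo (u.drop k) := by
  intro n
  induction n with
  | zero =>
    intro u hu k hpref hk
    have hnil : u = [] := List.eq_nil_of_length_eq_zero (by omega)
    subst hnil
    have hk0 : k = 0 := by simpa using hk
    subst hk0
    simp
  | succ n IHn =>
    intro u hu k hpref hk
    cases k with
    | zero => simp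
    | succ k =>
      cases u with
      | nil => simp at hk
      | cons c t =>
        simp only [List.length_cons] at hu hk
        have hc : c ≠ '(' := by
          have := hpref 0 (Nat.succ_pos k)
          simpa using this
        simp only [pvBgo]
        rw [dif_pos hc]
        by_cases hp : PySem.Chars.find (c :: t) ['('] = -1
        · rw [dif_pos hp]
          have hnm : '(' ∉ (c :: t) := pv_not_mem_of_find_neg (c :: t) '(' hp
          have hdnm : '(' ∉ (c :: t).drop (k + 1) := fun hm => hnm (List.mem_of_mem_drop hm)
          rw [pvBgo_no_paren _ hdnm]
          simp only [List.length_drop, List.length_cons]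
          push_cast
          omega
        · rw [dif_neg hp]
          obtain ⟨h0, h1, hmin⟩ := pv_find_spec' (c :: t) '(' hp
          have hpcast : PySem.Chars.find (c :: t) ['('] =
              ((PySem.Chars.find (c :: t) ['(']).toNat : Int) := by omega
          have hpk : k + 1 ≤ (PySem.Chars.find (c :: t) ['(']).toNat := by
            by_contra hlt
            exact hpref _ (by omega) h1
          have hplen : (PySem.Chars.find (c :: t) ['(']).toNat < t.length + 1 := by
            by_contra hge
            rw [List.getElem?_eq_none_iff.mpr (by simp only [List.length_cons]; omega)] at h1
            simp at h1
          rw [hpcast, PySem.List.slice_from _ (by omega), Int.toNat_natCast]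
          have hIH := IHn ((c :: t).drop (k + 1))
            (by simp only [List.length_drop, List.length_cons]; omega)
            ((PySem.Chars.find (c :: t) ['(']).toNat - (k + 1))
            (by
              intro i hi
              rw [List.getElem?_drop]
              exact hmin ((k + 1) + i) (by omega))
            (by simp only [List.length_drop, List.length_cons]; omega)
          rw [List.drop_drop] at hIH
          have harg : (k + 1) + ((PySem.Chars.find (c :: t) ['(']).toNat - (k + 1))
              = (PySem.Chars.find (c :: t) ['(']).toNat := by omega
          rw [harg] at hIH
          rw [hIH]
          push_cast [Nat.cast_sub hpk]
          ring

theorem pvBgo_cons_ne (c : Char) (t : List Char) (hc : ¬ c = '(') :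
    pvBgo (c :: t) = 1 + pvBgo t := by
  have h := pvBgo_drop_run (c :: t).length (c :: t) le_rfl 1
    (by
      intro i hi
      have hi0 : i = 0 := by omega
      subst hi0
      simp [hc])
    (by simp)
  simpa using h

-- pvAgo exits immediately once the index passes the end
theorem pv_ago_exit (fuel : Nat) (s : List Char) (i acc : Int) (h : (s.length : Int) ≤ i) :
    pvAgo fuel s i acc = acc := by
  cases fuel with
  | zero => rfl
  | succ f => simp only [pvAgo]; rw [if_neg (by omega)]

-- fuel arithmetic for the recursive call on the content slice
theorem pv_fuel_arith (L i m f : Nat) (h1 : i + 2 ≤ L) (hm : m + i + 2 ≤ L)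
    (hf : (L + 1) * (L + 1) - i ≤ f + 1) : (m + 1) * (m + 1) ≤ f := by
  have hiL : i ≤ L := by omega
  have h2 : (L + 1) * (L + 1) ≤ f + 1 + i := by omega
  obtain ⟨d, hd⟩ : ∃ d, L = m + i + 2 + d := ⟨L - (m + i + 2), by omega⟩
  subst hd
  nlinarith

-- THE MAIN LEMMA: with enough fuel and a good string, A's loop from index i
-- computes acc + (B's value on the suffix from i).
theorem pv_main : ∀ fuel : Nat, ∀ (s : List Char) (i : Nat) (acc : Int),
    pvGoodb s = true → i ≤ s.length → (s.length + 1) * (s.length + 1) - i ≤ fuel →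
    pvAgo fuel s (i : Int) acc = acc + pvBgo (s.drop i) := by
  intro fuel
  induction fuel using Nat.strong_induction_on with
  | _ fuel IH =>
    intro s i acc hgood hi hfuel
    have hsq : i < (s.length + 1) * (s.length + 1) := by nlinarith
    obtain ⟨f, rfl⟩ : ∃ f, fuel = f + 1 := ⟨fuel - 1, by omega⟩
    rcases Nat.lt_or_ge i s.length with hilt | hige
    · -- i < len
      have hu : s.drop i = s[i] :: s.drop (i + 1) := List.drop_eq_getElem_cons hilt
      have hget : PySem.List.pyGet? s (i : Int) = some s[i] := by
        rw [PySem.List.pyGet?_natCast, List.getElem?_eq_getElem hilt]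
      simp only [pvAgo]
      rw [if_pos (by exact_mod_cast hilt)]
      have hcast1 : ((i : Int) + 1) = ((i + 1 : Nat) : Int) := by push_cast; ring
      by_cases hpar : s[i] = '('
      · -- s[i] = '('
        rw [if_pos (by rw [hget, hpar])]
        rw [PySem.Chars.findFrom_natCast s [')'] i hi]
        have hu' : s.drop i = '(' :: s.drop (i + 1) := by rw [hu, hpar]
        set jB := PySem.Chars.find (s.drop i) [')'] with hjBdef
        by_cases hjB : jB = -1
        · -- no ')' after i
          rw [if_pos hjB]
          rw [if_pos (show (-1 : Int) = -1 from rfl)]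
          rw [hu']
          simp only [pvBgo]
          rw [dif_neg (show ¬(('(' : Char) ≠ '(') by decide)]
          rw [← hu', ← hjBdef, dif_pos hjB]
          simp only [List.length_drop]
          omega
        · -- found ')' at i + jN
          rw [if_neg hjB]
          obtain ⟨hjB0, hocc, hmin⟩ := pv_find_spec' (s.drop i) ')' hjB
          rw [← hjBdef] at hjB0 hocc hmin
          set jN := jB.toNat with hjNdef
          have hjBN : jB = (jN : Int) := by omega
          have hj1 : 1 ≤ jN := by
            rcases Nat.eq_zero_or_pos jN with h0 | h1
            · rw [h0] at hocc
              rw [List.getElem?_drop] at hocc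
              simp only [Nat.add_zero] at hocc
              rw [List.getElem?_eq_getElem hilt] at hocc
              simp [hpar] at hocc
            · exact h1
          have hjlen : i + jN < s.length := by
            have : jN < (s.drop i).length := by
              by_contra hge
              rw [List.getElem?_eq_none_iff.mpr (by omega)] at hocc
              simp at hocc
            rw [List.length_drop] at this
            omega
          rw [if_neg (by omega)]
          -- the marker string, shared by both sides
          have hmarkA : PySem.List.slice s (some ((i : Int) + 1)) (some ((i : Int) + jB))
              = List.take (jN - 1) (List.drop (i + 1) s) := by
            rw [hcast1, hjBN]
            have : ((i : Int) + (jN : Int)) = ((i + jN : Nat) : Int) := by push_cast; ring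
            rw [this, PySem.List.slice_natCast]
            congr 1
            omega
          rw [hmarkA]
          -- unfold B
          rw [hu']
          simp only [pvBgo]
          rw [dif_neg (show ¬(('(' : Char) ≠ '(') by decide)]
          rw [← hu', ← hjBdef, dif_neg hjB]
          have hmarkB : PySem.List.slice (s.drop i) (some 1) (some jB)
              = List.take (jN - 1) (List.drop (i + 1) s) := by
            rw [hjBN]
            have h1' : (1 : Int) = ((1 : Nat) : Int) := by norm_num
            rw [h1', PySem.List.slice_natCast]
            rw [hu']
            simp
          rw [hmarkB]
          set parts := PySem.Chars.splitOn (List.take (jN - 1) (List.drop (i + 1) s)) ['x']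
            with hpartsdef
          by_cases hp2 : parts.length = 2
          · -- a real marker: use pvGoodb
            have hp2n : ¬(parts.length ≠ 2) := not_not_intro hp2
            rw [if_neg hp2n, if_neg hp2n]
            have hmk := pv_goodb_elim s hgood i hilt
              (by rw [List.getElem?_eq_getElem hilt, hpar])
            -- relate jB to the find on the tail
            have hcons := pv_find_cons_ne '(' ')' (s.drop (i + 1)) (by decide)
            rw [← hpar, ← hu, ← hjBdef] at hcons
            have hjt : PySem.Chars.find (s.drop (i + 1)) [')'] ≠ -1 := by
              intro h0
              rw [h0, if_pos rfl] at hcons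
              exact hjB hcons
            have hjteq : jB = 1 + PySem.Chars.find (s.drop (i + 1)) [')'] := by
              rw [hcons, if_neg hjt]
            have hjtN : (PySem.Chars.find (s.drop (i + 1)) [')']).toNat = jN - 1 := by
              have := PySem.Chars.neg_one_le_find (s.drop (i + 1)) [')']
              omega
            simp only [pvMarkerOKb] at hmk
            rw [if_neg hjt, hjtN, ← hpartsdef, if_pos hp2] at hmk
            rcases hA : PySem.Int.ofChars? (parts.getD 0 []) with _ | a
            · rw [hA] at hmk; simp at hmk
            rcases hB : PySem.Int.ofChars? (parts.getD 1 []) with _ | b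
            · rw [hA, hB] at hmk; simp at hmk
            rw [hA, hB] at hmk
            have ha : 0 ≤ a := by simpa using hmk
            simp only []
            -- the content slice
            set aN := a.toNat with haNdef
            have haN : (aN : Int) = a := Int.toNat_of_nonneg ha
            have hce : (i : Int) + jB + 1 + a = ((i + jN + 1 : Nat) : Int) + ((aN : Nat) : Int) := by
              rw [hjBN, ← haN]; push_cast; ring
            have hcs : (i : Int) + jB + 1 = ((i + jN + 1 : Nat) : Int) := by
              rw [hjBN]; push_cast; ring
            have hcontent : PySem.List.slice s (some ((i : Int) + jB + 1))
                (some ((i : Int) + jB + 1 + a)) = List.take aN (List.drop (i + jN + 1) s) := by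
              rw [hce, hcs, PySem.List.slice_natCast_add]
            rw [hcontent, hce]
            -- B's rest
            have hrest : PySem.List.slice (s.drop i) (some (jB + 1)) none
                = List.drop (i + jN + 1) s := by
              rw [PySem.List.slice_from _ (by omega : (0:Int) ≤ jB + 1)]
              rw [List.drop_drop]
              congr 1
              omega
            rw [hrest]
            rw [PySem.List.slice_to _ ha, PySem.List.slice_from _ ha]
            rw [List.drop_drop, ← haNdef]
            -- recursive call on the content
            have hi2 : i + 2 ≤ s.length := by omega
            have hmlen : (List.take aN (List.drop (i + jN + 1) s)).length + i + 2 ≤ s.length := by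
              simp only [List.length_take, List.length_drop]
              omega
            have hsub := IH f (by omega) (List.take aN (List.drop (i + jN + 1) s)) 0 0
              (pv_goodb_take _ aN (pv_goodb_drop s (i + jN + 1) hgood)) (Nat.zero_le _)
              (by
                have := pv_fuel_arith s.length i (List.take aN (List.drop (i + jN + 1) s)).length f
                  hi2 (by omega) hfuel
                omega)
            simp only [Nat.cast_zero, List.drop_zero, zero_add] at hsub
            rw [hsub]
            -- the continuation after the content
            rcases Nat.lt_or_ge s.length (i + jN + 1 + aN) with hbig | hle
            · rw [pv_ago_exit f s _ _ (by push_cast; omega)]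
              rw [List.drop_eq_nil_of_le (by omega : s.length ≤ i + jN + 1 + aN)]
              simp only [pvBgo]
              ring
            · have hcont := IH f (by omega) s (i + jN + 1 + aN)
                (acc + pvBgo (List.take aN (List.drop (i + jN + 1) s)) * b)
                hgood hle (by omega)
              have hmerge : ((i + jN + 1 : Nat) : Int) + ((aN : Nat) : Int)
                  = ((i + jN + 1 + aN : Nat) : Int) := by push_cast; ring
              rw [hmerge, hcont]
              ring
          · -- parts.length ≠ 2: '(' is a literal char
            rw [if_pos hp2, if_pos hp2]
            rw [hcast1]
            rw [IH f (by omega) s (i + 1) (acc + 1) hgood (by omega) (by omega)]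
            ring
      · -- s[i] ≠ '('
        rw [if_neg (by rw [hget]; simp [hpar])]
        rw [hcast1]
        rw [IH f (by omega) s (i + 1) (acc + 1) hgood (by omega) (by omega)]
        rw [hu, pvBgo_cons_ne s[i] (s.drop (i + 1)) hpar]
        ring
    · -- i ≥ len: loop exits, suffix empty
      have hie : i = s.length := by omega
      rw [pv_ago_exit _ _ _ _ (by omega)]
      rw [List.drop_eq_nil_of_le (by omega)]
      simp [pvBgo]

-- ===== VERDICT (by name: the statement is the Claim_ definition above) =====
theorem decompressed_length_v2_spec : Claim_equal_decompressed_length_v2 := by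
  intro s _hdom hpre
  unfold Spec_decompressed_length_v2 decompressed_length_v2 decompressed_length_v2_alt
  have hmul : (s.toList.length + 1) * (s.toList.length + 1)
      ≤ (s.toList.length + 2) * (s.toList.length + 2) := by nlinarith
  have h := pv_main ((s.toList.length + 2) * (s.toList.length + 2)) s.toList 0 0 hpre
    (Nat.zero_le _) (by omega)
  simpa using h
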